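-- pv_equiv track=rewrite | github.com/Summer942/- | 所有已做题目的代码/openjudge 2 & sunnywhy/月度开销.py | min_max_cost
-- ===== SOURCE A (Python) =====
-- def check(budgets,m,mid):
--     count=0
--     total=0
--     for budget in budgets:
--         total+=budget
--         if total>mid:
--             count+=1
--             total=budget
--     if total>0:
--         count+=1
--     return count<=m
--
-- def min_max_cost(budgets,n,m):
--     left=max(budgets)
--     right=sum(budgets)
--     while left<right:
--         mid=(left+right)//2
--         if check(budgets,m,mid):
--             right=mid
--         else:
--             left=mid+1
--     return left
-- ===== SOURCE B (Python) =====
-- def min_max_cost(budgets, n, m):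
--     lo = max(budgets)
--     hi = sum(budgets)
--     prefix = [0]
--     s = 0
--     for x in budgets:
--         s += x
--         prefix.append(s)
--
--     def fits(cap):
--         groups = 0
--         base = prefix[0]
--         for prev, cur in zip(prefix, prefix[1:]):
--             if cur > base + cap:
--                 groups += 1
--                 base = prev
--         if prefix[-1] > base:
--             groups += 1
--         return groups <= m
--
--     def solve(left, right):
--         if left >= right:
--             return left
--         mid = left + (right - left) // 2
--         if fits(mid):
--             return solve(left, mid)
--         return solve(mid + 1, right)
--
--     return solve(lo, hi)
-- ===== Notes on version B (the rewrite author's own statement) =====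
-- stated objective: alternative
-- what changed: The feasibility test is reformulated as a single pass over a once-precomputed prefix-sum table with a moving group-base pointer (A re-accumulates a running total inside every check call), and A's while-loop bisection becomes a recursive search with the midpoint in offset form; the probe sequence is kept, which is required for exact equality because the greedy check is not monotone on lists with negative entries.
import Mathlib
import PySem

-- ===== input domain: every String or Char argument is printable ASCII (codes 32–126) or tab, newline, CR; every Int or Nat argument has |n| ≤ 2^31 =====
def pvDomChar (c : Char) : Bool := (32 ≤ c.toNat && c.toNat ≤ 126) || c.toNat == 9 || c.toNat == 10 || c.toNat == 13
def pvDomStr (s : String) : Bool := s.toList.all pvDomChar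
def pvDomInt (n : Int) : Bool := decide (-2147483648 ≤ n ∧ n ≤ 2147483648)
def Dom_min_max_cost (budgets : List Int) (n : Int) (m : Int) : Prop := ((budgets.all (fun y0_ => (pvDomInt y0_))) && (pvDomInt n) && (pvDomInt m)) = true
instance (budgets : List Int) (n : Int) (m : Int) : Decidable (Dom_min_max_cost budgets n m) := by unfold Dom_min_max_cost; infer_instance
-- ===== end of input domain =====

-- B keeps A's probe sequence (required for exact equality on non-monotone negative inputs) but
-- recomputes the feasibility test as one pass over precomputed prefix sums with a moving group-base
-- pointer (A re-accumulates a running total per call) and replaces the while-loop bisection by a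
-- recursive offset-form search; objective: alternative decomposition, return value only.

-- ===== PORT A =====
-- Python built-ins shared by both sources: max(xs) (raises ValueError on [], excluded by Pre_) and sum(xs)
def pyMax (xs : List Int) : Int := (PySem.List.max? xs (fun b => b)).getD 0
def pySum (xs : List Int) : Int := xs.sum

-- body of A's `for budget in budgets` loop in `check`, state = (count, total)
def stepA (mid : Int) (st : Int × Int) (budget : Int) : Int × Int :=
  let total := st.2 + budget
  if total > mid then (st.1 + 1, budget) else (st.1, total)

def check (budgets : List Int) (m : Int) (mid : Int) : Bool :=
  let st := budgets.foldl (stepA mid) (0, 0)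
  let count := if st.2 > 0 then st.1 + 1 else st.1
  decide (count ≤ m)

-- midpoint bounds used by the termination proofs of both searches
theorem pvMid_bounds {l r : Int} (h : l < r) :
    l ≤ PySem.Int.floordiv (l + r) 2 ∧ PySem.Int.floordiv (l + r) 2 < r := by
  rw [PySem.Int.floordiv_eq_ediv_of_pos (by omega)]
  omega

theorem pvOff_bounds {l r : Int} (h : l < r) :
    0 ≤ PySem.Int.floordiv (r - l) 2 ∧ PySem.Int.floordiv (r - l) 2 < r - l := by
  rw [PySem.Int.floordiv_eq_ediv_of_pos (by omega)]
  omega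

-- A's `while left < right` binary-search loop
def bsearch (budgets : List Int) (m : Int) (left right : Int) : Int :=
  if h : left < right then
    let mid := PySem.Int.floordiv (left + right) 2
    if check budgets m mid then bsearch budgets m left mid
    else bsearch budgets m (mid + 1) right
  else left
termination_by (right - left).toNat
decreasing_by
  · have := pvMid_bounds h; omega
  · have := pvMid_bounds h; omega

def min_max_cost (budgets : List Int) (n : Int) (m : Int) : Int :=
  bsearch budgets m (pyMax budgets) (pySum budgets)

-- ===== PORT B =====
-- body of B's prefix-building loop, state = (prefix, s)
def stepP (st : List Int × Int) (x : Int) : List Int × Int :=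
  let s := st.2 + x
  (st.1 ++ [s], s)

def prefixSums (budgets : List Int) : List Int := (budgets.foldl stepP ([0], 0)).1

-- body of B's `for prev, cur in zip(prefix, prefix[1:])` loop, state = (groups, base)
def stepB (cap : Int) (st : Int × Int) (pc : Int × Int) : Int × Int :=
  if pc.2 > st.2 + cap then (st.1 + 1, pc.1) else st

def fits (pre : List Int) (m : Int) (cap : Int) : Bool :=
  let st := (pre.zip (PySem.List.slice pre (some 1) none)).foldl (stepB cap)
      (0, PySem.List.pyGetD pre 0 0)
  let groups := if PySem.List.pyGetD pre (-1) 0 > st.2 then st.1 + 1 else st.1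
  decide (groups ≤ m)

-- B's recursive `solve(left, right)`
def solveB (pre : List Int) (m : Int) (left right : Int) : Int :=
  if h : left < right then
    let mid := left + PySem.Int.floordiv (right - left) 2
    if fits pre m mid then solveB pre m left mid
    else solveB pre m (mid + 1) right
  else left
termination_by (right - left).toNat
decreasing_by
  · have := pvOff_bounds h; omega
  · have := pvOff_bounds h; omega

def min_max_cost_alt (budgets : List Int) (n : Int) (m : Int) : Int :=
  solveB (prefixSums budgets) m (pyMax budgets) (pySum budgets)

-- ===== PRECONDITION & SPEC =====
-- Pre_ excludes only the empty list, on which Python's max(budgets) raises ValueError in both A and B.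
def Pre_min_max_cost (budgets : List Int) (n : Int) (m : Int) : Prop := budgets ≠ []
instance (budgets : List Int) (n : Int) (m : Int) : Decidable (Pre_min_max_cost budgets n m) := by
  unfold Pre_min_max_cost; infer_instance

def pvWitness_min_max_cost : List Int × Int × Int := ([1, 2, 3], 3, 2)

def Spec_min_max_cost (budgets : List Int) (n : Int) (m : Int) (out : Int) : Prop :=
  out = min_max_cost_alt budgets n m
instance (budgets : List Int) (n : Int) (m : Int) (out : Int) :
    Decidable (Spec_min_max_cost budgets n m out) := by
  unfold Spec_min_max_cost; infer_instance

-- ===== CLAIM =====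
def Claim_equal_min_max_cost : Prop :=
  ∀ (budgets : List Int) (n : Int) (m : Int), Dom_min_max_cost budgets n m →
    Pre_min_max_cost budgets n m → Spec_min_max_cost budgets n m (min_max_cost budgets n m)

-- ===== LEMMAS AND PROOFS =====

-- proof-side structural form of the prefix-sum list (without the leading 0)
def pfx : Int → List Int → List Int
  | _, [] => []
  | s, x :: xs => (s + x) :: pfx (s + x) xs

theorem foldl_stepP (xs : List Int) : ∀ (acc : List Int) (s : Int),
    (xs.foldl stepP (acc, s)).1 = acc ++ pfx s xs := by
  induction xs with
  | nil => intro acc s; simp [pfx]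
  | cons x xs ih => intro acc s; simp [List.foldl_cons, stepP, pfx, ih, List.append_assoc]

theorem prefixSums_eq (xs : List Int) : prefixSums xs = 0 :: pfx 0 xs := by
  simp [prefixSums, foldl_stepP]

theorem pfx_getLast? (xs : List Int) : ∀ s : Int,
    (s :: pfx s xs).getLast? = some (s + xs.sum) := by
  induction xs with
  | nil => intro s; simp [pfx]
  | cons x xs ih =>
      intro s
      simp only [pfx, List.getLast?_cons_cons]
      rw [show (s + x) :: pfx (s + x) xs = (s + x) :: pfx (s + x) xs from rfl] at *
      have := ih (s + x)
      simpa [List.sum_cons, add_assoc] using this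

-- the fold of B's zip loop simulates A's running-total loop: total = current prefix − base
theorem core (cap : Int) : ∀ (xs : List Int) (s c base : Int),
    ((s :: pfx s xs).zip (pfx s xs)).foldl (stepB cap) (c, base)
      = ((xs.foldl (stepA cap) (c, s - base)).1,
         s + xs.sum - (xs.foldl (stepA cap) (c, s - base)).2) := by
  intro xs
  induction xs with
  | nil =>
      intro s c base
      simp only [pfx, List.zip_nil_right, List.foldl_nil, List.sum_nil, Prod.mk.injEq]
      exact ⟨trivial, by omega⟩
  | cons x xs ih =>
      intro s c base
      simp only [pfx, List.zip_cons_cons, List.foldl_cons]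
      by_cases h : s + x > base + cap
      · have e1 : stepB cap (c, base) (s, s + x) = (c + 1, s) := by
          simp [stepB, h]
        have e2 : stepA cap (c, s - base) x = (c + 1, x) := by
          simp only [stepA]; rw [if_pos (by omega)]
        rw [e1, e2]
        have h3 := ih (s + x) (c + 1) s
        have hx : s + x - s = x := by omega
        rw [hx] at h3
        rw [h3]
        simp only [List.sum_cons, Prod.mk.injEq]
        exact ⟨trivial, by omega⟩
      · have e1 : stepB cap (c, base) (s, s + x) = (c, base) := by
          simp only [stepB]; rw [if_neg (by omega)]
        have e2 : stepA cap (c, s - base) x = (c, s - base + x) := by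
          simp only [stepA]; rw [if_neg (by omega)]
        rw [e1, e2]
        have h3 := ih (s + x) c base
        have hx : s + x - base = s - base + x := by omega
        rw [hx] at h3
        rw [h3]
        simp only [List.sum_cons, Prod.mk.injEq]
        exact ⟨trivial, by omega⟩

theorem fits_eq_check (xs : List Int) (m cap : Int) :
    fits (prefixSums xs) m cap = check xs m cap := by
  rw [prefixSums_eq]
  simp only [fits, check, PySem.List.slice_from_one, List.tail_cons,
    PySem.List.pyGetD_zero_cons]
  have hcore := core cap xs 0 0 0
  rw [show (0:Int) - 0 = 0 from by norm_num] at hcore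
  rw [hcore]
  have hlast : PySem.List.pyGetD (0 :: pfx 0 xs) (-1) 0 = 0 + xs.sum := by
    rw [PySem.List.pyGetD_neg_one (xs := 0 :: pfx 0 xs) (d := 0) (by simp)]
    have h := pfx_getLast? xs 0
    rw [List.getLast?_eq_some_getLast (by simp : (0 :: pfx 0 xs) ≠ [])] at h
    exact Option.some.inj h
  rw [hlast]
  by_cases hF : (List.foldl (stepA cap) (0, 0) xs).2 > 0
  · rw [if_pos (by omega), if_pos hF]
  · rw [if_neg (by omega), if_neg hF]

theorem search_eq (budgets : List Int) (m : Int) : ∀ (k : Nat) (l r : Int),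
    (r - l).toNat ≤ k → bsearch budgets m l r = solveB (prefixSums budgets) m l r := by
  intro k
  induction k with
  | zero =>
      intro l r h
      rw [bsearch, solveB]
      have : ¬ l < r := by omega
      simp [this]
  | succ k ih =>
      intro l r h
      rw [bsearch, solveB]
      by_cases hlr : l < r
      · simp only [dif_pos hlr]
        have hmid : PySem.Int.floordiv (l + r) 2 = l + PySem.Int.floordiv (r - l) 2 := by
          rw [PySem.Int.floordiv_eq_ediv_of_pos (by omega : (0:Int) < 2),
              PySem.Int.floordiv_eq_ediv_of_pos (by omega : (0:Int) < 2)]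
          omega
        have hb := pvMid_bounds hlr
        rw [fits_eq_check, ← hmid]
        by_cases hc : check budgets m (PySem.Int.floordiv (l + r) 2)
        · simp only [hc, if_true]
          exact ih l _ (by omega)
        · simp only [hc]
          exact ih _ r (by omega)
      · simp [hlr]

-- ===== VERDICT =====
theorem min_max_cost_spec : Claim_equal_min_max_cost := by
  intro budgets n m _ _
  unfold Spec_min_max_cost min_max_cost min_max_cost_alt
  exact search_eq budgets m (pySum budgets - pyMax budgets).toNat _ _ (le_refl _)
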